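-- pv_equiv track=rewrite | github.com/Sajjan-Sam/Robustness-Ablation-CV-Models-Deep-Learning--Assignment---02- | cv_assign_04_gpu_split_local_fast5/cv_assign_04_gpu_split_local_fast5/assignment2_gpu_split_module.py | _batch_candidates
-- ===== SOURCE A (Python) =====
-- def _batch_candidates(target: int):
--     target = int(target)
--     ordered = [target, 192, 160, 144, 128, 112, 96, 80, 64, 48, 32]
--     out = []
--     for x in ordered:
--         if x <= target and x not in out:
--             out.append(x)
--     if target not in out:
--         out.insert(0, target)
--     return out
-- ===== SOURCE B (Python) =====
-- def _drop_ge(cs, t):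
--     # constants are sorted descending, so everything < t is a suffix:
--     # peel off the leading run of values >= t.
--     if cs and cs[0] >= t:
--         return _drop_ge(cs[1:], t)
--     return cs
--
-- def _batch_candidates(target: int):
--     t = int(target)
--     return [t] + _drop_ge([192, 160, 144, 128, 112, 96, 80, 64, 48, 32], t)
-- ===== Notes on version B (the rewrite author's own statement) =====
-- stated objective: simpler
-- what changed: Exploits that the constant list is already sorted descending: the wanted constants (< target) form a suffix, obtained by recursively dropping the leading run of constants >= target and prepending target, with no membership tests, dedup, filter or sort.
import Mathlib
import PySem

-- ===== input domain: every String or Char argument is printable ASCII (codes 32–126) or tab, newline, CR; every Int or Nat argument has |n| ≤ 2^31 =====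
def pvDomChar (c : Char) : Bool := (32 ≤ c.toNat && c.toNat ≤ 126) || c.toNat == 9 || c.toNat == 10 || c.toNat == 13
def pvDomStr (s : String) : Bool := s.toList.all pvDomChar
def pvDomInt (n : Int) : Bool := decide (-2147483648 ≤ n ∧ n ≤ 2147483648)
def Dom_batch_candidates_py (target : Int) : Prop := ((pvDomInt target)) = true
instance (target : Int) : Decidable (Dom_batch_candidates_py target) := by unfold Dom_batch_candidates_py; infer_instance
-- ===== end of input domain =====

-- B exploits that the constant list is sorted descending: the constants < target are a
-- suffix, obtained by dropping the leading run ≥ target — no membership dedup, no sort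
-- (objective: simpler).

-- ===== PORT A =====
def batch_candidates_py (target : Int) : List Int :=
  let ordered : List Int := [target, 192, 160, 144, 128, 112, 96, 80, 64, 48, 32]
  let out : List Int :=
    ordered.foldl (fun out x => if x ≤ target ∧ x ∉ out then out ++ [x] else out) []
  if target ∉ out then target :: out else out

-- ===== PORT B =====
-- recursive helper of Source B: drop the leading run of constants ≥ t
def pvDropGe (t : Int) : List Int → List Int
  | [] => []
  | c :: cs => if c ≥ t then pvDropGe t cs else c :: cs

def batch_candidates_py_alt (target : Int) : List Int :=
  let t := target
  [t] ++ pvDropGe t [192, 160, 144, 128, 112, 96, 80, 64, 48, 32]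

-- ===== PRECONDITION & SPEC =====
def Spec_batch_candidates_py (target : Int) (out : List Int) : Prop := out = batch_candidates_py_alt target
instance (target : Int) (out : List Int) : Decidable (Spec_batch_candidates_py target out) := by unfold Spec_batch_candidates_py; infer_instance

-- ===== CLAIM (what is proved, stated in full; the proofs are below) =====
def Claim_equal_batch_candidates_py : Prop := ∀ (target : Int), Dom_batch_candidates_py target → Spec_batch_candidates_py target (batch_candidates_py target)

-- ===== LEMMAS AND PROOFS =====

def pvCs : List Int := [192, 160, 144, 128, 112, 96, 80, 64, 48, 32]

-- A's dedup loop over distinct constants, once `t` is already in the accumulator,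
-- appends exactly the constants strictly below `t`.
theorem pv_foldA (t : Int) :
    ∀ (cs acc : List Int), t ∈ acc → cs.Nodup → (∀ c ∈ cs, c ∈ acc → c = t) →
    cs.foldl (fun out x => if x ≤ t ∧ x ∉ out then out ++ [x] else out) acc
      = acc ++ cs.filter (fun c => decide (c < t)) := by
  intro cs
  induction cs with
  | nil => intro acc _ _ _; simp
  | cons c cs ih =>
    intro acc ht hnd hmem
    simp only [List.foldl_cons, List.filter_cons]
    rcases lt_trichotomy c t with hlt | heq | hgt
    · have hcn : c ∉ acc := fun h => absurd (hmem c (by simp) h) (by omega)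
      rw [if_pos ⟨le_of_lt hlt, hcn⟩, ih (acc ++ [c]) (by simp [ht]) hnd.of_cons ?_]
      · simp [hlt]
      · intro c' hc' h
        rcases List.mem_append.mp h with h | h
        · exact hmem c' (by simp [hc']) h
        · simp only [List.mem_singleton] at h
          exact absurd (h ▸ hc') (List.nodup_cons.mp hnd).1
    · subst heq
      rw [if_neg (by simp [ht]), ih acc ht hnd.of_cons
        (fun c' hc' h => hmem c' (by simp [hc']) h)]
      simp
    · rw [if_neg (by omega), ih acc ht hnd.of_cons
        (fun c' hc' h => hmem c' (by simp [hc']) h)]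
      simp [not_lt_of_gt hgt]

theorem pv_canon_A (t : Int) :
    batch_candidates_py t = t :: pvCs.filter (fun c => decide (c < t)) := by
  simp only [batch_candidates_py]
  rw [show ([t, 192, 160, 144, 128, 112, 96, 80, 64, 48, 32] : List Int) = [t] ++ pvCs from rfl,
     List.foldl_append]
  rw [show (List.foldl (fun out x => if x ≤ t ∧ x ∉ out then out ++ [x] else out) [] [t]) = [t] by
    simp]
  rw [pv_foldA t pvCs [t] (by simp) (by decide) (fun c _ h => by simpa using h)]
  simp

-- on a strictly descending list, dropping the leading run ≥ t leaves exactly the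
-- elements < t
theorem pv_dropGe_eq_filter (t : Int) :
    ∀ (cs : List Int), List.Pairwise (· > ·) cs →
    pvDropGe t cs = cs.filter (fun c => decide (c < t)) := by
  intro cs
  induction cs with
  | nil => intro _; rfl
  | cons c cs ih =>
    intro hp
    have hp' := List.pairwise_cons.mp hp
    simp only [pvDropGe, List.filter_cons]
    by_cases h : c ≥ t
    · rw [if_pos h, if_neg (by simp; omega), ih hp'.2]
    · rw [if_neg h, if_pos (by simp; omega)]
      congr 1
      symm
      rw [List.filter_eq_self]
      intro a ha
      have := hp'.1 a ha
      simp
      omega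

theorem pv_canon_B (t : Int) :
    batch_candidates_py_alt t = t :: pvCs.filter (fun c => decide (c < t)) := by
  simp only [batch_candidates_py_alt]
  rw [show ([192, 160, 144, 128, 112, 96, 80, 64, 48, 32] : List Int) = pvCs from rfl,
     pv_dropGe_eq_filter t pvCs (by decide)]
  rfl

-- ===== VERDICT (by name: the statement is the Claim_ definition above) =====
theorem batch_candidates_py_spec : Claim_equal_batch_candidates_py := by
  intro t _
  unfold Spec_batch_candidates_py
  rw [pv_canon_A, pv_canon_B]
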